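-- pv_equiv track=rewrite | github.com/NSLS-II/vertical-integration | generate_travis_yml.py | nest_all_the_loops
-- ===== SOURCE A (Python) =====
-- def nest_all_the_loops(iterable, matrix=None, matrices=None):
--     if matrix is None:
--         matrix = {}
--     if matrices is None:
--         matrices = []
--     local_iterable = iterable.copy()
--     try:
--         lib, versions = local_iterable.pop(0)
--     except IndexError:
--         matrices.append(matrix.copy())
--         return
--     for version in versions:
--         matrix[lib] = version
--         nest_all_the_loops(local_iterable, matrix, matrices)
--     return matrices
-- ===== SOURCE B (Python) =====
-- def nest_all_the_loops(iterable, matrix=None, matrices=None):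
--     if matrix is None:
--         matrix = {}
--     if matrices is None:
--         matrices = []
--     if not iterable:
--         matrices.append(matrix.copy())
--         return
--     libs = [lib for lib, _ in iterable]
--     combos = [[]]
--     for _, versions in reversed(iterable):
--         combos = [[v] + c for v in versions for c in combos]
--     for combo in combos:
--         d = dict(matrix)
--         d.update(zip(libs, combo))
--         matrices.append(d)
--     return matrices
-- ===== Notes on version B (the rewrite author's own statement) =====
-- stated objective: idiomatic
-- what changed: A builds the cartesian product by recursion that threads one shared mutated dict through nested loops; B is non-recursive: it builds the list of value combinations iteratively back-to-front and then materialises each matrix as a fresh dict(matrix) updated with zip(libs, combo).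
import Mathlib
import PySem

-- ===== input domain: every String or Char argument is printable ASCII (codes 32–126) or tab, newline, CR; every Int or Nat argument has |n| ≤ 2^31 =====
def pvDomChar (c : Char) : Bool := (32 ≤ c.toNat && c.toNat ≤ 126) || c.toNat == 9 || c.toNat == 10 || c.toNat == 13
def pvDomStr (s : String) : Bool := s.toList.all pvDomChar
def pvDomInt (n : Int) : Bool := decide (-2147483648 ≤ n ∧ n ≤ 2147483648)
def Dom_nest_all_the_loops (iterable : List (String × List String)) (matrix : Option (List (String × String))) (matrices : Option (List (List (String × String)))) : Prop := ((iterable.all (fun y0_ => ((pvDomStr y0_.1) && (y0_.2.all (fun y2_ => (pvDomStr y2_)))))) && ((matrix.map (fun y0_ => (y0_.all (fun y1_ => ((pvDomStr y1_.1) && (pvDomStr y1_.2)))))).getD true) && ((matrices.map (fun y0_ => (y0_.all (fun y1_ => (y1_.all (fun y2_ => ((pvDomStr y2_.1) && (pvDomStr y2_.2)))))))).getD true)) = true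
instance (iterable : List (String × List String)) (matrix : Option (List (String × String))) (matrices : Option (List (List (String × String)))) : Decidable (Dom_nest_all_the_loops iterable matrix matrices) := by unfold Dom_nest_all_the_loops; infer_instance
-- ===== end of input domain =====

-- B replaces A's recursion threading one shared mutated dict by an iterative build of the
-- combination list plus a fresh dict per combination (idiomatic, same cost). Equivalence is about
-- the RETURN value only: both Pythons append to a caller-supplied `matrices`, and A additionally
-- mutates a caller-supplied `matrix` in place, which B does not.

-- ===== PORT A =====
-- A's recursion: pop the first (lib, versions); for each version set matrix[lib] = version and
-- recurse on the rest, sharing `matrix` and `matrices` (here: threaded as the fold state).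
def nestGoA (iterable : List (String × List String)) (matrix : PySem.Dict String String)
    (matrices : List (List (String × String))) :
    PySem.Dict String String × List (List (String × String)) :=
  match iterable with
  | [] => (matrix, matrices ++ [matrix.items])
  | (lib, versions) :: rest =>
      versions.foldl (fun st version => nestGoA rest (st.1.insert lib version) st.2)
        (matrix, matrices)
termination_by iterable.length
decreasing_by simp

def nest_all_the_loops (iterable : List (String × List String)) (matrix : Option (List (String × String))) (matrices : Option (List (List (String × String)))) : Option (List (List (String × String))) :=
  let m := PySem.Dict.ofList (matrix.getD [])
  let ms := matrices.getD []
  match iterable with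
  | [] => none                                   -- A appends matrix.copy() and returns None
  | _ :: _ => some (nestGoA iterable m ms).2     -- A returns `matrices`

-- ===== PORT B =====
-- Source B: combos starts as [[]] and is rebuilt once per (lib, versions) of reversed(iterable)
-- as [[v] + c for v in versions for c in combos]; then one fresh dict per combo.
def altCombos (versionlists : List (List String)) : List (List String) :=
  versionlists.reverse.foldl
    (fun combos versions => versions.flatMap (fun v => combos.map (fun c => v :: c))) [[]]

def nest_all_the_loops_alt (iterable : List (String × List String)) (matrix : Option (List (String × String))) (matrices : Option (List (List (String × String)))) : Option (List (List (String × String))) :=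
  match iterable with
  | [] => none
  | _ :: _ =>
      let m := PySem.Dict.ofList (matrix.getD [])
      let ms := matrices.getD []
      let libs := iterable.map Prod.fst
      some (ms ++ (altCombos (iterable.map Prod.snd)).map
        (fun c => (m.update (libs.zip c)).items))

-- ===== PRECONDITION & SPEC =====
def Spec_nest_all_the_loops (iterable : List (String × List String)) (matrix : Option (List (String × String))) (matrices : Option (List (List (String × String)))) (out : Option (List (List (String × String)))) : Prop := out = nest_all_the_loops_alt iterable matrix matrices
instance (iterable : List (String × List String)) (matrix : Option (List (String × String))) (matrices : Option (List (List (String × String)))) (out : Option (List (List (String × String)))) : Decidable (Spec_nest_all_the_loops iterable matrix matrices out) := by unfold Spec_nest_all_the_loops; infer_instance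

-- ===== CLAIM (what is proved, stated in full; the proofs are below) =====
def Claim_equal_nest_all_the_loops : Prop := ∀ (iterable : List (String × List String)) (matrix : Option (List (String × String))) (matrices : Option (List (List (String × String)))), Dom_nest_all_the_loops iterable matrix matrices → Spec_nest_all_the_loops iterable matrix matrices (nest_all_the_loops iterable matrix matrices)

-- ===== LEMMAS AND PROOFS =====

-- `prodC` is the foldr view of B's reversed-foldl combination build.

def prodC (versionlists : List (List String)) : List (List String) :=
  versionlists.foldr (fun versions combos => versions.flatMap (fun v => combos.map (fun c => v :: c))) [[]]

theorem altCombos_eq_prodC (vls : List (List String)) : altCombos vls = prodC vls := by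
  simp [altCombos, prodC, List.foldl_reverse]

theorem length_mem_prodC {vls : List (List String)} {c : List String}
    (hc : c ∈ prodC vls) : c.length = vls.length := by
  induction vls generalizing c with
  | nil => simp [prodC] at hc; simp [hc]
  | cons vs rest ih =>
      simp only [prodC, List.foldr_cons, List.mem_flatMap, List.mem_map] at hc
      obtain ⟨v, _, c', hc', rfl⟩ := hc
      simp [ih hc']

-- dict lemmas (String keys; `insert` overwrites in place, new keys append)

theorem contains_mono_insert (d : PySem.Dict String String) (k l : String) (v : String)
    (h : d.contains k = true) : (d.insert l v).contains k = true := by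
  simp [PySem.Dict.contains_insert, h]

theorem mask_keys (k : String) (d : PySem.Dict String String) :
    (d.items.map (fun p => if p.1 = k then (k, "") else p)).map Prod.fst = d.keys := by
  simp only [List.map_map, PySem.Dict.keys]
  apply List.map_congr_left
  intro p _
  by_cases h : p.1 = k <;> simp [h]

theorem insert_comm_of_contains (d : PySem.Dict String String) (k k' : String) (w v' : String)
    (hk : d.contains k = true) (hne : k' ≠ k) :
    (d.insert k w).insert k' v' = (d.insert k' v').insert k w := by
  apply PySem.Dict.ext
  by_cases h' : d.contains k' = true
  · rw [PySem.Dict.items_insert_of_contains _ v'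
        (by simp [PySem.Dict.contains_insert, h']),
      PySem.Dict.items_insert_of_contains _ w hk,
      PySem.Dict.items_insert_of_contains _ w
        (by simp [PySem.Dict.contains_insert, hk]),
      PySem.Dict.items_insert_of_contains _ v' h']
    simp only [List.map_map]
    apply List.map_congr_left
    intro p _
    by_cases h1 : p.1 = k <;> by_cases h2 : p.1 = k' <;>
      simp [h1, h2, hne, Ne.symm hne]
  · have h'f : d.contains k' = false := by simpa using h'
    rw [PySem.Dict.items_insert_of_not_contains _ v'
        (by simp [PySem.Dict.contains_insert, h'f, hne]),
      PySem.Dict.items_insert_of_contains _ w hk,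
      PySem.Dict.items_insert_of_contains _ w
        (by simp [PySem.Dict.contains_insert, hk]),
      PySem.Dict.items_insert_of_not_contains _ v' h'f]
    simp [hne]

theorem update_insert_comm (ps : List (String × String)) (d : PySem.Dict String String)
    (k w : String) (hk : d.contains k = true) (hps : ∀ p ∈ ps, p.1 ≠ k) :
    (d.insert k w).update ps = (d.update ps).insert k w := by
  induction ps generalizing d with
  | nil => rfl
  | cons p tl ih =>
      simp only [PySem.Dict.update, List.foldl_cons] at *
      rw [insert_comm_of_contains d k p.1 w p.2 hk (hps p (by simp))]
      exact ih (d.insert p.1 p.2) (contains_mono_insert d k p.1 p.2 hk)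
        (fun q hq => hps q (by simp [hq]))

def MEq (k : String) (d₁ d₂ : PySem.Dict String String) : Prop :=
  d₁.items.map (fun p => if p.1 = k then (k, "") else p)
    = d₂.items.map (fun p => if p.1 = k then (k, "") else p)

theorem MEq_keys (k : String) (d₁ d₂ : PySem.Dict String String) (h : MEq k d₁ d₂) :
    d₁.keys = d₂.keys := by
  rw [← mask_keys k d₁, ← mask_keys k d₂, h]

theorem MEq_contains (k j : String) (d₁ d₂ : PySem.Dict String String) (h : MEq k d₁ d₂) :
    d₁.contains j = d₂.contains j := by
  rw [PySem.Dict.contains_eq_decide_mem_keys, PySem.Dict.contains_eq_decide_mem_keys,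
    MEq_keys k d₁ d₂ h]

theorem mask_id_of_not_contains (k : String) (d : PySem.Dict String String)
    (h : d.contains k = false) :
    d.items.map (fun p => if p.1 = k then (k, "") else p) = d.items := by
  have : ∀ p ∈ d.items, p.1 ≠ k := by
    intro p hp hpk
    have : d.contains k = true := by
      unfold PySem.Dict.contains
      rw [List.any_eq_true]
      exact ⟨p, hp, by simp [hpk]⟩
    simp [this] at h
  calc d.items.map (fun p => if p.1 = k then (k, "") else p)
      = d.items.map id := List.map_congr_left (fun p hp => by simp [this p hp])
    _ = d.items := List.map_id _

theorem MEq_insert_self (k : String) (d₁ d₂ : PySem.Dict String String) (x : String)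
    (h : MEq k d₁ d₂) : d₁.insert k x = d₂.insert k x := by
  apply PySem.Dict.ext
  by_cases hc : d₁.contains k = true
  · have hc2 : d₂.contains k = true := by rw [← MEq_contains k k d₁ d₂ h]; exact hc
    rw [PySem.Dict.items_insert_of_contains _ x hc, PySem.Dict.items_insert_of_contains _ x hc2]
    have e : ∀ (d : PySem.Dict String String),
        d.items.map (fun p => if (p.1 == k) = true then (k, x) else p)
          = (d.items.map (fun p => if p.1 = k then (k, "") else p)).map
              (fun q => if q.1 = k then (k, x) else q) := by
      intro d
      simp only [List.map_map]
      apply List.map_congr_left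
      intro p _
      by_cases hp : p.1 = k <;> simp [hp]
    rw [e, e, h]
  · have hc1 : d₁.contains k = false := by simpa using hc
    have hc2 : d₂.contains k = false := by rw [← MEq_contains k k d₁ d₂ h]; exact hc1
    rw [PySem.Dict.items_insert_of_not_contains _ x hc1,
      PySem.Dict.items_insert_of_not_contains _ x hc2]
    have := h
    unfold MEq at this
    rw [mask_id_of_not_contains k d₁ hc1, mask_id_of_not_contains k d₂ hc2] at this
    rw [this]

theorem MEq_insert_ne (k : String) (d₁ d₂ : PySem.Dict String String) (k'' v : String)
    (h : MEq k d₁ d₂) (hne : k'' ≠ k) : MEq k (d₁.insert k'' v) (d₂.insert k'' v) := by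
  unfold MEq
  by_cases hc : d₁.contains k'' = true
  · have hc2 : d₂.contains k'' = true := by rw [← MEq_contains k k'' d₁ d₂ h]; exact hc
    rw [PySem.Dict.items_insert_of_contains _ v hc, PySem.Dict.items_insert_of_contains _ v hc2]
    have e : ∀ (d : PySem.Dict String String),
        (d.items.map (fun p => if (p.1 == k'') = true then (k'', v) else p)).map
            (fun p => if p.1 = k then (k, "") else p)
          = (d.items.map (fun p => if p.1 = k then (k, "") else p)).map
              (fun q => if q.1 = k'' then (k'', v) else q) := by
      intro d
      simp only [List.map_map]
      apply List.map_congr_left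
      intro p _
      by_cases h1 : p.1 = k'' <;> by_cases h2 : p.1 = k <;>
        simp [h1, h2, hne, Ne.symm hne]
    rw [e, e, h]
  · have hc1 : d₁.contains k'' = false := by simpa using hc
    have hc2 : d₂.contains k'' = false := by rw [← MEq_contains k k'' d₁ d₂ h]; exact hc1
    rw [PySem.Dict.items_insert_of_not_contains _ v hc1,
      PySem.Dict.items_insert_of_not_contains _ v hc2]
    simp only [List.map_append]
    rw [h]

theorem update_of_MEq (ps : List (String × String)) (k : String)
    (d₁ d₂ : PySem.Dict String String) (h : MEq k d₁ d₂) (hk : k ∈ ps.map Prod.fst) :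
    d₁.update ps = d₂.update ps := by
  induction ps generalizing d₁ d₂ with
  | nil => simp at hk
  | cons p tl ih =>
      simp only [PySem.Dict.update, List.foldl_cons] at *
      by_cases hp : p.1 = k
      · subst hp
        rw [MEq_insert_self p.1 d₁ d₂ p.2 h]
      · have : k ∈ tl.map Prod.fst := by
          simp only [List.map_cons, List.mem_cons] at hk
          tauto
        exact ih (d₁.insert p.1 p.2) (d₂.insert p.1 p.2)
          (MEq_insert_ne k d₁ d₂ p.1 p.2 h hp) this

theorem MEq_insert_insert (k : String) (d : PySem.Dict String String) (v w : String) :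
    MEq k (d.insert k v) (d.insert k w) := by
  unfold MEq
  by_cases hc : d.contains k = true
  · rw [PySem.Dict.items_insert_of_contains _ v hc, PySem.Dict.items_insert_of_contains _ w hc]
    simp only [List.map_map]
    apply List.map_congr_left
    intro p _
    by_cases hp : p.1 = k <;> simp [hp]
  · have hc1 : d.contains k = false := by simpa using hc
    rw [PySem.Dict.items_insert_of_not_contains _ v hc1,
      PySem.Dict.items_insert_of_not_contains _ w hc1]
    simp

theorem MEq_insert_absorb (k : String) (d : PySem.Dict String String) (w : String)
    (hk : d.contains k = true) : MEq k (d.insert k w) d := by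
  unfold MEq
  rw [PySem.Dict.items_insert_of_contains _ w hk]
  simp only [List.map_map]
  apply List.map_congr_left
  intro p _
  by_cases hp : p.1 = k <;> simp [hp]

-- the main characterisation of A's recursion: (a) its matrices list is B's list;
-- (b)/(c) the facts needed about the threaded (shared, mutated) matrix.

theorem nestGoA_main (iterable : List (String × List String)) :
    (∀ m ms, (nestGoA iterable m ms).2
        = ms ++ (prodC (iterable.map Prod.snd)).map
            (fun c => (m.update ((iterable.map Prod.fst).zip c)).items))
    ∧ (∀ m ms ws, ws.length = iterable.length →
        ((nestGoA iterable m ms).1).update ((iterable.map Prod.fst).zip ws)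
          = m.update ((iterable.map Prod.fst).zip ws))
    ∧ (∀ m ms (k : String), m.contains k = true → ((nestGoA iterable m ms).1).contains k = true) := by
  induction iterable with
  | nil =>
      refine ⟨?_, ?_, ?_⟩
      · intro m ms; simp [nestGoA, prodC, PySem.Dict.update]
      · intro m ms ws hlen
        have hws : ws = [] := List.eq_nil_of_length_eq_zero (by simpa using hlen)
        subst hws; simp [nestGoA]
      · intro m ms k h; simpa [nestGoA] using h
  | cons hd rest ih =>
      obtain ⟨iha, ihb, ihc⟩ := ih
      obtain ⟨l, vs⟩ := hd
      have inner : ∀ (m : PySem.Dict String String) (vs' : List String)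
          (a : PySem.Dict String String) (ms0 : List (List (String × String))),
          (∀ w ws, ws.length = rest.length →
            (a.insert l w).update ((rest.map Prod.fst).zip ws)
              = (m.insert l w).update ((rest.map Prod.fst).zip ws)) →
          (∀ k, m.contains k = true → a.contains k = true) →
          ((vs'.foldl (fun st v => nestGoA rest (st.1.insert l v) st.2) (a, ms0)).2
            = ms0 ++ vs'.flatMap (fun v => (prodC (rest.map Prod.snd)).map
                (fun c => ((m.insert l v).update ((rest.map Prod.fst).zip c)).items)))
          ∧ (∀ w ws, ws.length = rest.length →
              ((vs'.foldl (fun st v => nestGoA rest (st.1.insert l v) st.2) (a, ms0)).1.insert l w).update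
                  ((rest.map Prod.fst).zip ws)
                = (m.insert l w).update ((rest.map Prod.fst).zip ws))
          ∧ (∀ k, m.contains k = true →
              ((vs'.foldl (fun st v => nestGoA rest (st.1.insert l v) st.2) (a, ms0)).1).contains k = true) := by
        intro m vs'
        induction vs' with
        | nil =>
            intro a ms0 H1 H2
            exact ⟨by simp, H1, H2⟩
        | cons v vs' ihv =>
            intro a ms0 H1 H2
            have hws' : ∀ ws : List String, ws.length = rest.length →
                ((rest.map Prod.fst).zip ws).map Prod.fst = rest.map Prod.fst := by
              intro ws hws
              exact List.map_fst_zip (by simp [hws])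
            have halc : (a.insert l v).contains l = true := PySem.Dict.contains_insert_self a l v
            have s1 := nestGoA rest (a.insert l v) ms0
            have hs2 : (nestGoA rest (a.insert l v) ms0).2
                = ms0 ++ (prodC (rest.map Prod.snd)).map
                    (fun c => ((m.insert l v).update ((rest.map Prod.fst).zip c)).items) := by
              rw [iha (a.insert l v) ms0]
              congr 1
              apply List.map_congr_left
              intro c hc
              rw [H1 v c (by simpa using length_mem_prodC hc)]
            have hlc : (nestGoA rest (a.insert l v) ms0).1.contains l = true :=
              ihc (a.insert l v) ms0 l halc
            have H1' : ∀ w ws, ws.length = rest.length →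
                (((nestGoA rest (a.insert l v) ms0).1.insert l w)).update ((rest.map Prod.fst).zip ws)
                  = (m.insert l w).update ((rest.map Prod.fst).zip ws) := by
              intro w ws hws
              by_cases hmem : l ∈ rest.map Prod.fst
              · have hinzip : l ∈ ((rest.map Prod.fst).zip ws).map Prod.fst := by
                  rw [hws' ws hws]; exact hmem
                calc ((nestGoA rest (a.insert l v) ms0).1.insert l w).update ((rest.map Prod.fst).zip ws)
                    = (nestGoA rest (a.insert l v) ms0).1.update ((rest.map Prod.fst).zip ws) :=
                      update_of_MEq _ l _ _ (MEq_insert_absorb l _ w hlc) hinzip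
                  _ = (a.insert l v).update ((rest.map Prod.fst).zip ws) := ihb (a.insert l v) ms0 ws hws
                  _ = (m.insert l v).update ((rest.map Prod.fst).zip ws) := H1 v ws hws
                  _ = (m.insert l w).update ((rest.map Prod.fst).zip ws) :=
                      update_of_MEq _ l _ _ (MEq_insert_insert l m v w) hinzip
              · have hnot : ∀ p ∈ (rest.map Prod.fst).zip ws, p.1 ≠ l := by
                  intro p hp hpl
                  exact hmem (hpl ▸ (hws' ws hws ▸ List.mem_map_of_mem hp))
                calc ((nestGoA rest (a.insert l v) ms0).1.insert l w).update ((rest.map Prod.fst).zip ws)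
                    = ((nestGoA rest (a.insert l v) ms0).1.update ((rest.map Prod.fst).zip ws)).insert l w :=
                      update_insert_comm _ _ l w hlc hnot
                  _ = ((a.insert l v).update ((rest.map Prod.fst).zip ws)).insert l w := by
                      rw [ihb (a.insert l v) ms0 ws hws]
                  _ = ((a.insert l v).insert l w).update ((rest.map Prod.fst).zip ws) :=
                      (update_insert_comm _ _ l w halc hnot).symm
                  _ = (a.insert l w).update ((rest.map Prod.fst).zip ws) := by
                      rw [PySem.Dict.insert_insert_self]
                  _ = (m.insert l w).update ((rest.map Prod.fst).zip ws) := H1 w ws hws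
            have H2' : ∀ k, m.contains k = true →
                (nestGoA rest (a.insert l v) ms0).1.contains k = true := by
              intro k hk
              exact ihc (a.insert l v) ms0 k (contains_mono_insert a k l v (H2 k hk))
            obtain ⟨ra, rb, rc⟩ := ihv (nestGoA rest (a.insert l v) ms0).1
              (nestGoA rest (a.insert l v) ms0).2 H1' H2'
            refine ⟨?_, ?_, ?_⟩
            · rw [List.foldl_cons]
              simp only []
              rw [show (nestGoA rest (a.insert l v) ms0) =
                  ((nestGoA rest (a.insert l v) ms0).1, (nestGoA rest (a.insert l v) ms0).2) from rfl] at *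
              rw [ra, hs2]
              simp [List.flatMap_cons, List.append_assoc]
            · intro w ws hws
              rw [List.foldl_cons]
              exact rb w ws hws
            · intro k hk
              rw [List.foldl_cons]
              exact rc k hk
      have unfoldc : ∀ m ms, nestGoA ((l, vs) :: rest) m ms
          = vs.foldl (fun st v => nestGoA rest (st.1.insert l v) st.2) (m, ms) := by
        intro m ms; rw [nestGoA]
      refine ⟨?_, ?_, ?_⟩
      · intro m ms
        have h := (inner m vs m ms (fun w ws _ => rfl) (fun k h => h)).1
        rw [unfoldc, h]
        simp only [List.map_cons, prodC, List.foldr_cons]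
        congr 1
        rw [List.map_flatMap]
        apply List.flatMap_congr
        intro v _
        rw [List.map_map]
        apply List.map_congr_left
        intro c _
        rfl
      · intro m ms ws hlen
        cases ws with
        | nil => simp at hlen
        | cons w ws' =>
            have h := (inner m vs m ms (fun w ws _ => rfl) (fun k h => h)).2.1 w ws'
              (by simpa using hlen)
            rw [unfoldc]
            simp only [List.map_cons, List.zip_cons_cons, PySem.Dict.update, List.foldl_cons] at h ⊢
            exact h
      · intro m ms k hk
        rw [unfoldc]
        exact (inner m vs m ms (fun w ws _ => rfl) (fun k h => h)).2.2 k hk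

-- ===== VERDICT (by name: the statement is the Claim_ definition above) =====
theorem nest_all_the_loops_spec : Claim_equal_nest_all_the_loops := by
  intro iterable matrix matrices _
  unfold Spec_nest_all_the_loops
  cases iterable with
  | nil => rfl
  | cons hd tl =>
      simp only [nest_all_the_loops, nest_all_the_loops_alt, altCombos_eq_prodC]
      exact congrArg some ((nestGoA_main (hd :: tl)).1 _ _)
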